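-- pv_equiv track=rewrite | github.com/pypi-data/pypi-mirror-401 | packages/sirnaforge/sirnaforge-0.4.1-py3-none-any.whl/sirnaforge/core/design.py | _has_poly_runs
-- ===== SOURCE A (Python) =====
-- def _has_poly_runs(sequence: str, max_runs: int) -> bool:
--     """Check for runs of identical nucleotides exceeding threshold."""
--     current_base = sequence[0]
--     current_run = 1
--
--     for base in sequence[1:]:
--         if base == current_base:
--             current_run += 1
--             if current_run > max_runs:
--                 return True
--         else:
--             current_base = base
--             current_run = 1
--
--     return False
-- ===== SOURCE B (Python) =====
-- from itertools import groupby
--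
--
-- def _has_poly_runs(sequence: str, max_runs: int) -> bool:
--     """Check for runs of identical nucleotides exceeding threshold.
--
--     A run of length L (L >= 2) exceeds max_runs iff its L-1 adjacent equal
--     pairs form a block of length >= max_runs, so look at the pairwise
--     equality sequence and test its maximal True-blocks with groupby.
--     """
--     pair_eq = [a == b for a, b in zip(sequence, sequence[1:])]
--     return any(k and sum(1 for _ in g) >= max_runs for k, g in groupby(pair_eq))
-- ===== Notes on version B (the rewrite author's own statement) =====
-- stated objective: alternative
-- what changed: Instead of a stateful counter reset on base change, B builds the adjacent pairwise-equality list and uses itertools.groupby to test whether any maximal block of equal pairs has length >= max_runs; no run counter is carried across the scan.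
import Mathlib
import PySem

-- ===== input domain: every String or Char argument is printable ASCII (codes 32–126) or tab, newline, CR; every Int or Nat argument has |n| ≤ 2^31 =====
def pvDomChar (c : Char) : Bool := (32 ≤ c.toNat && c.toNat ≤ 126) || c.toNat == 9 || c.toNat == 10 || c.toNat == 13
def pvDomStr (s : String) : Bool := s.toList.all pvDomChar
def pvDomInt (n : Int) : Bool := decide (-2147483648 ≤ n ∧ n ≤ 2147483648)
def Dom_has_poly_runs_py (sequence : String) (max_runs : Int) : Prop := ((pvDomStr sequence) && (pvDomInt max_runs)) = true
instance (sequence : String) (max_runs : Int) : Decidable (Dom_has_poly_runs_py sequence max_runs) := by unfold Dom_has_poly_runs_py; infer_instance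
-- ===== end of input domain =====

-- B replaces A's stateful run counter by a pairwise-equality list grouped with groupby (alternative decomposition, same O(n) cost); on the empty string A raises IndexError while B returns False.

-- ===== PORT A =====
-- the for-loop of A: state (current_base, current_run), early return on current_run > max_runs
def pvLoopA (l : List Char) (current_base : Char) (current_run : Int) (max_runs : Int) : Bool :=
  match l with
  | [] => false
  | base :: rest =>
      if base == current_base then
        (if current_run + 1 > max_runs then true else pvLoopA rest current_base (current_run + 1) max_runs)
      else
        pvLoopA rest base 1 max_runs

def has_poly_runs_py (sequence : String) (max_runs : Int) : Bool :=
  match sequence.toList with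
  | [] => false      -- sequence[0] raises IndexError in Python; excluded by Pre_
  | c :: rest => pvLoopA rest c 1 max_runs   -- sequence[1:] of a nonempty string is its tail

-- ===== PORT B =====
-- [a == b for a, b in zip(sequence, sequence[1:])]
def pvPairEq (s : List Char) : List Bool := (s.zip (s.drop 1)).map (fun p => p.1 == p.2)

-- itertools.groupby: the list split into maximal blocks of equal elements
def pvGroups : List Bool → List (List Bool)
  | [] => []
  | c :: rest => (c :: rest.takeWhile (· == c)) :: pvGroups (rest.dropWhile (· == c))
  termination_by l => l.length
  decreasing_by
    have := List.length_dropWhile_le (· == c) rest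
    simp; omega

-- any(k and sum(1 for _ in g) >= max_runs for k, g in groupby(pair_eq))
def has_poly_runs_py_alt (sequence : String) (max_runs : Int) : Bool :=
  (pvGroups (pvPairEq sequence.toList)).any
    (fun g => match g with
      | [] => false
      | k :: _ => k && ((g.length : Int) ≥ max_runs))

-- ===== PRECONDITION & SPEC =====
-- Pre_ excludes exactly the empty string, on which A raises IndexError.
def Pre_has_poly_runs_py (sequence : String) (max_runs : Int) : Prop := sequence ≠ ""
instance (sequence : String) (max_runs : Int) : Decidable (Pre_has_poly_runs_py sequence max_runs) := by unfold Pre_has_poly_runs_py; infer_instance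
def pvWitness_has_poly_runs_py : String × Int := ("AAAAT", 3)

def Spec_has_poly_runs_py (sequence : String) (max_runs : Int) (out : Bool) : Prop := out = has_poly_runs_py_alt sequence max_runs
instance (sequence : String) (max_runs : Int) (out : Bool) : Decidable (Spec_has_poly_runs_py sequence max_runs out) := by unfold Spec_has_poly_runs_py; infer_instance

-- ===== CLAIM (what is proved, stated in full; the proofs are below) =====
def Claim_equal_has_poly_runs_py : Prop := ∀ (sequence : String) (max_runs : Int), Dom_has_poly_runs_py sequence max_runs → Pre_has_poly_runs_py sequence max_runs → Spec_has_poly_runs_py sequence max_runs (has_poly_runs_py sequence max_runs)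

-- ===== LEMMAS AND PROOFS =====

-- B's `any` over the groups, as a function of the boolean list
def pvAny (m : Int) (bs : List Bool) : Bool :=
  (pvGroups bs).any
    (fun g => match g with
      | [] => false
      | k :: _ => k && ((g.length : Int) ≥ m))

theorem pvAlt_eq (s : String) (m : Int) : has_poly_runs_py_alt s m = pvAny m (pvPairEq s.toList) := rfl

-- pairwise-equality list, in a head-recursive form convenient for induction
def pvEqP : Char → List Char → List Bool
  | _, [] => []
  | x, y :: r => (x == y) :: pvEqP y r

theorem pvPairEq_eq : ∀ (s : List Char) (x : Char), pvPairEq (x :: s) = pvEqP x s := by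
  intro s
  induction s with
  | nil => intro x; rfl
  | cons y r ih =>
      intro x
      simp only [pvPairEq, pvEqP] at *
      simp only [List.drop_one, List.tail_cons, List.zip_cons_cons, List.map_cons]
      have := ih y
      simp only [List.drop_one, List.tail_cons] at this
      rw [this]

theorem takeWhile_replicate_true (k : Nat) (bs : List Bool) :
    (List.replicate k true ++ bs).takeWhile (· == true) =
      List.replicate k true ++ bs.takeWhile (· == true) := by
  induction k with
  | zero => simp
  | succ n ih => simp [List.replicate_succ]

theorem dropWhile_replicate_true (k : Nat) (bs : List Bool) :
    (List.replicate k true ++ bs).dropWhile (· == true) = bs.dropWhile (· == true) := by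
  induction k with
  | zero => simp
  | succ n ih => simp [List.replicate_succ]

-- dropping a leading False block does not change the answer
theorem pvAny_dropFalse : ∀ (bs : List Bool) (m : Int),
    pvAny m (bs.dropWhile (· == false)) = pvAny m bs := by
  intro bs
  induction bs with
  | nil => intro m; rfl
  | cons b r ih =>
      intro m
      cases b with
      | true => simp
      | false =>
          simp only [List.dropWhile_cons]
          simp only [show ((false == false) = true) from rfl, if_true]
          rw [ih]
          conv_rhs => rw [pvAny, pvGroups]
          simp only [List.any_cons]
          have : pvAny m r = (pvGroups (r.dropWhile (· == false))).any
              (fun g => match g with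
                | [] => false
                | k :: _ => k && ((g.length : Int) ≥ m)) := by
            rw [← ih m]; rfl
          rw [← ih m]
          simp [pvAny, Bool.false_and]

theorem pvAny_false_cons (bs : List Bool) (m : Int) :
    pvAny m (false :: bs) = pvAny m bs := by
  conv_lhs => rw [pvAny, pvGroups]
  simp only [List.any_cons, Bool.false_and, Bool.false_or]
  rw [show ((pvGroups (bs.dropWhile (· == false))).any
      (fun g => match g with
        | [] => false
        | k :: _ => k && ((g.length : Int) ≥ m))) = pvAny m (bs.dropWhile (· == false)) from rfl]
  exact pvAny_dropFalse bs m

-- a leading True block of length ≥ m (and ≥ 1) makes the answer true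
theorem pvAny_long_true (j : Nat) (bs : List Bool) (m : Int)
    (hj : 1 ≤ j) (hm : m ≤ (j : Int)) : pvAny m (List.replicate j true ++ bs) = true := by
  obtain ⟨j', rfl⟩ : ∃ j', j = j' + 1 := ⟨j - 1, by omega⟩
  rw [pvAny]
  rw [show List.replicate (j' + 1) true ++ bs = true :: (List.replicate j' true ++ bs) by
    simp [List.replicate_succ]]
  rw [pvGroups]
  simp only [List.any_cons]
  rw [takeWhile_replicate_true]
  have hlen : ((true :: (List.replicate j' true ++ (bs.takeWhile (· == true)))).length : Int) ≥ m := by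
    simp only [List.length_cons, List.length_append, List.length_replicate]
    push_cast
    omega
  rw [Bool.true_and, decide_eq_true hlen]
  simp

-- a leading True block of length k < m followed by False contributes nothing
theorem pvAny_short_true_false (k : Nat) (bs : List Bool) (m : Int)
    (hk : k = 0 ∨ (k : Int) < m) :
    pvAny m (List.replicate k true ++ false :: bs) = pvAny m bs := by
  cases k with
  | zero => simpa using pvAny_false_cons bs m
  | succ k' =>
      have hkm : ((k' : Int) + 1) < m := by
        rcases hk with h | h
        · omega
        · push_cast at h; omega
      rw [pvAny]
      rw [show List.replicate (k' + 1) true ++ false :: bs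
            = true :: (List.replicate k' true ++ false :: bs) by simp [List.replicate_succ]]
      rw [pvGroups]
      simp only [List.any_cons]
      rw [takeWhile_replicate_true, dropWhile_replicate_true]
      have ht : (false :: bs).takeWhile (· == true) = [] := by simp
      have hd : (false :: bs).dropWhile (· == true) = false :: bs := by simp
      rw [ht, hd]
      rw [List.append_nil]
      have hlen : ¬ (((true :: List.replicate k' true).length : Int) ≥ m) := by
        simp only [List.length_cons, List.length_replicate]
        push_cast
        omega
      rw [Bool.true_and, decide_eq_false hlen, Bool.false_or]
      rw [show (pvGroups (false :: bs)).any
          (fun g => match g with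
            | [] => false
            | k :: _ => k && ((g.length : Int) ≥ m)) = pvAny m (false :: bs) from rfl]
      exact pvAny_false_cons bs m

-- a bare True block shorter than m (or with m compensating) yields false
theorem pvAny_replicate_short (k : Nat) (m : Int)
    (hk : k = 0 ∨ (k : Int) < m) : pvAny m (List.replicate k true) = false := by
  cases k with
  | zero => simp [pvAny, pvGroups]
  | succ k' =>
      have hkm : ((k' : Int) + 1) < m := by
        rcases hk with h | h
        · omega
        · push_cast at h; omega
      rw [pvAny]
      rw [show List.replicate (k' + 1) true = true :: (List.replicate k' true ++ ([] : List Bool)) by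
        simp [List.replicate_succ]]
      rw [pvGroups]
      rw [takeWhile_replicate_true, dropWhile_replicate_true]
      simp only [List.takeWhile_nil, List.dropWhile_nil, List.append_nil, pvGroups]
      simp only [List.any_cons, List.any_nil, Bool.or_false, Bool.true_and]
      rw [decide_eq_false]
      simp only [List.length_cons, List.length_replicate, ge_iff_le]
      push_cast
      omega

-- main loop invariant: A's loop with counter k+1 equals B's test with k pending True pairs
theorem pvLoopA_eq : ∀ (l : List Char) (x : Char) (k : Nat) (m : Int),
    (k = 0 ∨ (k : Int) + 1 ≤ m) →
    pvLoopA l x ((k : Int) + 1) m = pvAny m (List.replicate k true ++ pvEqP x l) := by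
  intro l
  induction l with
  | nil =>
      intro x k m hk
      rw [pvLoopA, pvEqP, List.append_nil]
      refine (pvAny_replicate_short k m ?_).symm
      rcases hk with h | h
      · exact Or.inl h
      · exact Or.inr (by omega)
  | cons y r ih =>
      intro x k m hk
      rw [pvEqP, pvLoopA]
      by_cases hxy : (y == x) = true
      · have hx : x = y := (beq_iff_eq.mp hxy).symm
        rw [if_pos hxy]
        subst hx
        rw [show List.replicate k true ++ (x == x) :: pvEqP x r
              = List.replicate (k + 1) true ++ pvEqP x r by
            simp [List.replicate_succ', List.append_assoc]]
        by_cases hgt : (k : Int) + 1 + 1 > m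
        · rw [if_pos hgt, pvAny_long_true (k + 1) _ m (by omega) (by push_cast; omega)]
        · rw [if_neg hgt]
          have h2 := ih x (k + 1) m (Or.inr (by push_cast; omega))
          rw [show (k : Int) + 1 + 1 = ((k + 1 : Nat) : Int) + 1 by push_cast; ring]
          exact h2
      · rw [if_neg hxy]
        have hx : (x == y) = false := by
          simp only [beq_eq_false_iff_ne] at hxy ⊢
          simp only [beq_iff_eq] at hxy
          intro h; exact hxy h.symm
        rw [hx]
        rw [pvAny_short_true_false k _ m
          (by rcases hk with h | h
              · exact Or.inl h
              · exact Or.inr (by omega))]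
        have h0 := ih y 0 m (Or.inl rfl)
        simpa using h0

theorem pv_toList_empty (s : String) (h : s.toList = []) : s = "" := by
  have h2 := congrArg String.ofList h
  rwa [String.ofList_toList] at h2

theorem has_poly_runs_py_spec : Claim_equal_has_poly_runs_py := by
  intro s m _ hpre
  unfold Spec_has_poly_runs_py
  rw [pvAlt_eq]
  unfold has_poly_runs_py
  cases h : s.toList with
  | nil => exact absurd (pv_toList_empty s h) hpre
  | cons c rest =>
      show pvLoopA rest c 1 m = pvAny m (pvPairEq (c :: rest))
      rw [pvPairEq_eq rest c]
      have h0 := pvLoopA_eq rest c 0 m (Or.inl rfl)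
      simpa using h0
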